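-- pv_equiv track=rewrite | github.com/pypi-data/pypi-mirror-135 | packages/zyl-utils/zyl_utils-0.1.4.tar.gz/zyl_utils-0.1.4/zyl_utils/model_utils/models/ner_t5.py | _combine_pred_target_texts_by_ids
-- ===== SOURCE A (Python) =====
-- def _combine_pred_target_texts_by_ids(pred_target_texts, split_ids, delimiter: str = '|') -> list:
--     """combine truncated_predicted_target_texts split_ids
--
--     Args:
--         pred_target_texts: the result of predicting the truncated input_texts
--         split_ids: get the truncated_ids when truncating input_texts
--         delimiter: the delimiter in target_text to split different entities
--
--     Returns:
--         pred_target_texts: predicted target_texts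
--     """
--     ids_target_text_dict = dict()
--     for i, j in zip(split_ids, pred_target_texts):
--         if not ids_target_text_dict.get(i):
--             ids_target_text_dict[i] = delimiter + j + delimiter
--         else:
--             ids_target_text_dict[i] = ids_target_text_dict[i] + j + delimiter
--
--     pred_target_texts = [ids_target_text_dict[k] for k in sorted(ids_target_text_dict.keys())]
--     return pred_target_texts  # type:list
-- ===== SOURCE B (Python) =====
-- def _combine_pred_target_texts_by_ids(pred_target_texts, split_ids, delimiter: str = '|') -> list:
--     """Stable-sort the (id, text) pairs by id, then emit one wrapped group per run of
--     equal ids in a single pass (no dict, no separate key sort)."""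
--     pairs = sorted(zip(split_ids, pred_target_texts), key=lambda p: p[0])
--     result = []
--     cur_id = None
--     run = []
--     for i, t in pairs:
--         if run and i != cur_id:
--             result.append(delimiter + delimiter.join(run) + delimiter)
--             run = []
--         cur_id = i
--         run.append(t)
--     if run:
--         result.append(delimiter + delimiter.join(run) + delimiter)
--     return result
-- ===== Notes on version B (the rewrite author's own statement) =====
-- stated objective: alternative
-- what changed: B replaces A's dict that repeatedly re-concatenates each group's growing string (plus a separate key sort and a .get() truthiness branch) by a stable sort of the (id, text) pairs and a single run-flushing scan that joins each group once with delimiter.join.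
import Mathlib
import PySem

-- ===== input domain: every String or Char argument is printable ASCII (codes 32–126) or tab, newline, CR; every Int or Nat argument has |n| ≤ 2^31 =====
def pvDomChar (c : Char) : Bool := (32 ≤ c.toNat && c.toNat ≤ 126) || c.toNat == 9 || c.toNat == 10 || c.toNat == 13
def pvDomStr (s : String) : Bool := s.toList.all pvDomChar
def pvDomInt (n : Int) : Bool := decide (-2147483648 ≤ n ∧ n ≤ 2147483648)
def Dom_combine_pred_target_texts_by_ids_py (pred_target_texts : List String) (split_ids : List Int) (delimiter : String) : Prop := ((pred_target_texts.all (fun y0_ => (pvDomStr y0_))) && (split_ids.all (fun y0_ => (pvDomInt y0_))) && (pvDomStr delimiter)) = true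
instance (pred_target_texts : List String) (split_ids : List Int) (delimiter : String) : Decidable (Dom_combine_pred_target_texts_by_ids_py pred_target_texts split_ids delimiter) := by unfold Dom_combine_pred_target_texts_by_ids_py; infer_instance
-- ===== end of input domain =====

-- B sorts the (id, text) pairs stably by id and emits each group with one delimiter.join per run,
-- instead of A's dict of strings grown by repeated concatenation and a separate key sort.


-- ===== PORT A =====
-- loop body of A: d[i] gets delimiter+j+delimiter when d.get(i) is falsy (missing or ""), else d[i]+j+delimiter
def aStep (delimiter : String) (d : PySem.Dict Int String) (ij : Int × String) : PySem.Dict Int String :=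
  if ((d.get? ij.1).getD "") = "" then d.insert ij.1 (delimiter ++ ij.2 ++ delimiter)
  else d.insert ij.1 (((d.get? ij.1).getD "") ++ ij.2 ++ delimiter)

def combine_pred_target_texts_by_ids_py (pred_target_texts : List String) (split_ids : List Int) (delimiter : String) : List String :=
  let d := (List.zip split_ids pred_target_texts).foldl (aStep delimiter) PySem.Dict.empty
  (PySem.List.sorted d.keys (fun k => k) false).map (fun k => d.getD k "")

-- ===== PORT B =====
-- delimiter + delimiter.join(run) + delimiter
def wrapS (delimiter : String) (run : List String) : String :=
  delimiter ++ PySem.Str.join delimiter run ++ delimiter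

-- loop body of B: state = (result, cur_id, run); flush the run when the id changes
def bStep (delimiter : String) (st : List String × Option Int × List String) (p : Int × String) :
    List String × Option Int × List String :=
  if st.2.2 ≠ [] ∧ st.2.1 ≠ some p.1 then (st.1 ++ [wrapS delimiter st.2.2], some p.1, [p.2])
  else (st.1, some p.1, st.2.2 ++ [p.2])

-- final flush after the loop
def bFinish (delimiter : String) (st : List String × Option Int × List String) : List String :=
  if st.2.2 ≠ [] then st.1 ++ [wrapS delimiter st.2.2] else st.1

def combine_pred_target_texts_by_ids_py_alt (pred_target_texts : List String) (split_ids : List Int) (delimiter : String) : List String :=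
  let pairs := PySem.List.sorted (List.zip split_ids pred_target_texts) (fun p => p.1) false
  bFinish delimiter (pairs.foldl (bStep delimiter) ([], none, []))

-- ===== PRECONDITION & SPEC =====
def Spec_combine_pred_target_texts_by_ids_py (pred_target_texts : List String) (split_ids : List Int) (delimiter : String) (out : List String) : Prop := out = combine_pred_target_texts_by_ids_py_alt pred_target_texts split_ids delimiter
instance (pred_target_texts : List String) (split_ids : List Int) (delimiter : String) (out : List String) : Decidable (Spec_combine_pred_target_texts_by_ids_py pred_target_texts split_ids delimiter out) := by unfold Spec_combine_pred_target_texts_by_ids_py; infer_instance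

-- ===== CLAIM (what is proved, stated in full; the proofs are below) =====
def Claim_equal_combine_pred_target_texts_by_ids_py : Prop := ∀ (pred_target_texts : List String) (split_ids : List Int) (delimiter : String), Dom_combine_pred_target_texts_by_ids_py pred_target_texts split_ids delimiter → Spec_combine_pred_target_texts_by_ids_py pred_target_texts split_ids delimiter (combine_pred_target_texts_by_ids_py pred_target_texts split_ids delimiter)


-- ===== LEMMAS AND PROOFS =====

-- proof-only helpers --------------------------------------------------------

-- the keys emitted after the current run, for a key-sorted pair list
def rkeys : Int → List (Int × String) → List Int
  | _, [] => []
  | c, p :: ps => if p.1 = c then rkeys c ps else p.1 :: rkeys p.1 ps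

-- recursive description of B's run-flushing loop + final flush
def scanB (delimiter : String) (res : List String) (c : Int) (run : List String) :
    List (Int × String) → List String
  | [] => res ++ [wrapS delimiter run]
  | p :: ps =>
    if p.1 = c then scanB delimiter res c (run ++ [p.2]) ps
    else scanB delimiter (res ++ [wrapS delimiter run]) p.1 [p.2] ps

-- string facts ---------------------------------------------------------------

lemma join_singleton_str (d t : String) : PySem.Str.join d [t] = t := by
  apply String.toList_inj.mp
  simp [PySem.Str.toList_join, PySem.Chars.join_singleton]

lemma chars_join_snoc (d c : List Char) (cs : List (List Char)) (h : cs ≠ []) :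
    PySem.Chars.join d (cs ++ [c]) = PySem.Chars.join d cs ++ d ++ c := by
  induction cs with
  | nil => exact absurd rfl h
  | cons a as ih =>
    cases as with
    | nil => simp [PySem.Chars.join_cons_cons, PySem.Chars.join_singleton]
    | cons b bs =>
      simp only [List.cons_append]
      rw [PySem.Chars.join_cons_cons, PySem.Chars.join_cons_cons]
      have := ih (by simp)
      simp only [List.cons_append] at this
      rw [this]
      simp

lemma join_snoc (d t : String) (ts : List String) (h : ts ≠ []) :
    PySem.Str.join d (ts ++ [t]) = PySem.Str.join d ts ++ d ++ t := by
  apply String.toList_inj.mp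
  simp only [PySem.Str.toList_join, List.map_append, List.map_cons, List.map_nil, String.toList_append]
  rw [chars_join_snoc d.toList t.toList (ts.map String.toList) (by simpa using h)]

lemma append_eq_empty (s t : String) (h : s ++ t = "") : s = "" ∧ t = "" := by
  have h2 := congrArg String.toList h
  simp at h2
  exact ⟨String.toList_inj.mp (by simp [h2.1]), String.toList_inj.mp (by simp [h2.2])⟩

lemma wrap_snoc (delimiter t : String) (ts : List String) (h : ts ≠ []) :
    wrapS delimiter (ts ++ [t]) = wrapS delimiter ts ++ t ++ delimiter := by
  simp only [wrapS, join_snoc delimiter t ts h]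
  simp [String.append_assoc]

-- A-side: the dictionary loop -----------------------------------------------

lemma aStep_eq (delimiter : String) (d : PySem.Dict Int String) (ij : Int × String) :
    aStep delimiter d ij = d.insert ij.1
      (if ((d.get? ij.1).getD "") = "" then delimiter ++ ij.2 ++ delimiter
       else ((d.get? ij.1).getD "") ++ ij.2 ++ delimiter) := by
  unfold aStep; split <;> rfl

lemma aLoop_get? (delimiter : String) :
    ∀ (ps : List (Int × String)) (d : PySem.Dict Int String) (g : Int → List String),
      (∀ k, d.get? k = if g k = [] then none else some (wrapS delimiter (g k))) →
      ∀ k, (ps.foldl (aStep delimiter) d).get? k =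
        (if g k ++ (ps.filter (fun p => p.1 == k)).map Prod.snd = [] then none
         else some (wrapS delimiter (g k ++ (ps.filter (fun p => p.1 == k)).map Prod.snd))) := by
  intro ps
  induction ps with
  | nil => intro d g hg k; simpa using hg k
  | cons p ps ih =>
    intro d g hg k
    rw [List.foldl_cons]
    have hstep : ∀ k, (aStep delimiter d p).get? k =
        (if (if k = p.1 then g k ++ [p.2] else g k) = [] then none
         else some (wrapS delimiter (if k = p.1 then g k ++ [p.2] else g k))) := by
      intro k
      rw [aStep_eq, PySem.Dict.get?_insert]
      by_cases hk : k = p.1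
      · rw [hk]
        rw [hg p.1]
        simp only [if_true]
        by_cases hgk : g p.1 = []
        · simp only [hgk]
          simp [wrapS, join_singleton_str]
        · simp only [if_neg hgk, Option.getD_some]
          by_cases hw : wrapS delimiter (g p.1) = ""
          · simp only [if_pos hw]
            have h1 := append_eq_empty _ _ hw
            have hd : delimiter = "" := (append_eq_empty _ _ h1.1).1
            have hj : PySem.Str.join delimiter (g p.1) = "" := (append_eq_empty _ _ h1.1).2
            rw [wrap_snoc delimiter p.2 (g p.1) hgk]
            rw [hd] at hj
            simp [wrapS, hd, hj]
          · simp only [if_neg hw]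
            rw [wrap_snoc delimiter p.2 (g p.1) hgk]
            simp [String.append_assoc]
      · simp only [if_neg hk]
        exact hg k
    rw [ih (aStep delimiter d p) _ hstep k]
    by_cases hk : k = p.1
    · subst hk
      simp [List.append_assoc]
    · have hne : (p.1 == k) = false := beq_eq_false_iff_ne.mpr (Ne.symm hk)
      rw [if_neg hk]
      rw [List.filter_cons_of_neg (by simp [hne])]

lemma aLoop_keys (delimiter : String) (ps : List (Int × String)) :
    (ps.foldl (aStep delimiter) PySem.Dict.empty).keys = PySem.Set.ofList (ps.map Prod.fst) := by
  have hfun : aStep delimiter = fun d ij => d.insert ij.1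
      (if ((d.get? ij.1).getD "") = "" then delimiter ++ ij.2 ++ delimiter
       else ((d.get? ij.1).getD "") ++ ij.2 ++ delimiter) := by
    funext d ij; exact aStep_eq delimiter d ij
  rw [hfun]
  rw [PySem.Dict.keys_foldl_insert_key ps Prod.fst _ PySem.Dict.empty]
  rw [PySem.Set.update_eq_append_filter]
  simp [PySem.Dict.keys_empty]

-- B-side: the run scan --------------------------------------------------------

lemma foldl_bStep_eq_scanB (delimiter : String) :
    ∀ (sp : List (Int × String)) (res : List String) (c : Int) (run : List String), run ≠ [] →
      bFinish delimiter (sp.foldl (bStep delimiter) (res, some c, run)) = scanB delimiter res c run sp := by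
  intro sp
  induction sp with
  | nil =>
    intro res c run hrun
    simp [bFinish, scanB, hrun]
  | cons p ps ih =>
    intro res c run hrun
    rw [List.foldl_cons]
    by_cases hpc : p.1 = c
    · have : bStep delimiter (res, some c, run) p = (res, some p.1, run ++ [p.2]) := by
        simp [bStep, hpc]
      rw [this, hpc, ih res c (run ++ [p.2]) (by simp)]
      simp [scanB, hpc]
    · have : bStep delimiter (res, some c, run) p = (res ++ [wrapS delimiter run], some p.1, [p.2]) := by
        simp only [bStep]
        rw [if_pos ⟨hrun, by simpa using fun h => hpc h.symm⟩]
      rw [this, ih _ p.1 [p.2] (by simp)]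
      simp [scanB, hpc]

lemma rkeys_gt : ∀ (sp : List (Int × String)) (c : Int),
    sp.Pairwise (fun a b => a.1 ≤ b.1) → (∀ p ∈ sp, c ≤ p.1) →
    ∀ q ∈ rkeys c sp, c < q := by
  intro sp
  induction sp with
  | nil => intro c _ _ q hq; simp [rkeys] at hq
  | cons p ps ih =>
    intro c hpw hle q hq
    rw [List.pairwise_cons] at hpw
    by_cases hpc : p.1 = c
    · simp only [rkeys, if_pos hpc] at hq
      exact ih c hpw.2 (fun r hr => hle r (by simp [hr])) q hq
    · simp only [rkeys, if_neg hpc, List.mem_cons] at hq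
      have hcp : c < p.1 := lt_of_le_of_ne (hle p (by simp)) (fun h => hpc h.symm)
      rcases hq with hq | hq
      · exact hq ▸ hcp
      · exact lt_trans hcp (ih p.1 hpw.2 hpw.1 q hq)

lemma mem_rkeys : ∀ (sp : List (Int × String)) (c : Int),
    sp.Pairwise (fun a b => a.1 ≤ b.1) → (∀ p ∈ sp, c ≤ p.1) →
    ∀ q, q ∈ rkeys c sp ↔ (q ∈ sp.map Prod.fst ∧ q ≠ c) := by
  intro sp
  induction sp with
  | nil => intro c _ _ q; simp [rkeys]
  | cons p ps ih =>
    intro c hpw hle q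
    rw [List.pairwise_cons] at hpw
    by_cases hpc : p.1 = c
    · simp only [rkeys, if_pos hpc]
      rw [ih c hpw.2 (fun r hr => hle r (by simp [hr])) q]
      constructor
      · rintro ⟨h1, h2⟩; exact ⟨by simp [h1], h2⟩
      · rintro ⟨h1, h2⟩
        simp only [List.map_cons, List.mem_cons] at h1
        rcases h1 with h1 | h1
        · exact absurd (h1.trans hpc) h2
        · exact ⟨h1, h2⟩
    · simp only [rkeys, if_neg hpc]
      have hcp : c < p.1 := lt_of_le_of_ne (hle p (by simp)) (fun h => hpc h.symm)
      rw [List.mem_cons, ih p.1 hpw.2 hpw.1 q]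
      constructor
      · rintro (h | ⟨h1, h2⟩)
        · exact ⟨by simp [h], fun hc => hpc (h ▸ hc)⟩
        · refine ⟨by simp [h1], fun hc => ?_⟩
          have := List.mem_map.mp h1
          rcases this with ⟨r, hr, hrq⟩
          have : p.1 ≤ q := hrq ▸ hpw.1 r hr
          omega
      · rintro ⟨h1, h2⟩
        simp only [List.map_cons, List.mem_cons] at h1
        rcases h1 with h1 | h1
        · exact Or.inl h1
        · by_cases hq : q = p.1
          · exact Or.inl hq
          · exact Or.inr ⟨h1, hq⟩

lemma rkeys_pairwise : ∀ (sp : List (Int × String)) (c : Int),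
    sp.Pairwise (fun a b => a.1 ≤ b.1) → (∀ p ∈ sp, c ≤ p.1) →
    (rkeys c sp).Pairwise (· < ·) := by
  intro sp
  induction sp with
  | nil => intro c _ _; simp [rkeys]
  | cons p ps ih =>
    intro c hpw hle
    rw [List.pairwise_cons] at hpw
    by_cases hpc : p.1 = c
    · simp only [rkeys, if_pos hpc]
      exact ih c hpw.2 (fun r hr => hle r (by simp [hr]))
    · simp only [rkeys, if_neg hpc]
      rw [List.pairwise_cons]
      exact ⟨fun q hq => rkeys_gt ps p.1 hpw.2 hpw.1 q hq, ih p.1 hpw.2 hpw.1⟩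

lemma scanB_eq (delimiter : String) :
    ∀ (sp : List (Int × String)) (res : List String) (c : Int) (run : List String),
      sp.Pairwise (fun a b => a.1 ≤ b.1) → (∀ p ∈ sp, c ≤ p.1) →
      scanB delimiter res c run sp =
        res ++ wrapS delimiter (run ++ (sp.filter (fun p => p.1 == c)).map Prod.snd) ::
          (rkeys c sp).map (fun q => wrapS delimiter ((sp.filter (fun p => p.1 == q)).map Prod.snd)) := by
  intro sp
  induction sp with
  | nil => intro res c run _ _; simp [scanB, rkeys]
  | cons p ps ih =>
    intro res c run hpw hle
    rw [List.pairwise_cons] at hpw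
    by_cases hpc : p.1 = c
    · simp only [scanB, if_pos hpc, rkeys]
      rw [ih res c (run ++ [p.2]) hpw.2 (fun r hr => hle r (by simp [hr]))]
      congr 1
      congr 1
      · rw [List.filter_cons_of_pos (by simp [hpc]), List.map_cons]
        simp [List.append_assoc]
      · apply List.map_congr_left
        intro q hq
        have hqc : c < q := rkeys_gt ps c hpw.2 (fun r hr => hle r (by simp [hr])) q hq
        rw [List.filter_cons_of_neg (by simp [hpc]; omega)]
    · have hcp : c < p.1 := lt_of_le_of_ne (hle p (by simp)) (fun h => hpc h.symm)
      simp only [scanB, if_neg hpc, rkeys]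
      rw [ih (res ++ [wrapS delimiter run]) p.1 [p.2] hpw.2 hpw.1]
      have hfc : (p :: ps).filter (fun r => r.1 == c) = [] := by
        rw [List.filter_eq_nil_iff]
        intro r hr
        simp only [List.mem_cons] at hr
        rcases hr with hr | hr
        · simp [hr, hpc]
        · have := hpw.1 r hr; simp; omega
      rw [hfc]
      have hhead : (p :: ps).filter (fun r => r.1 == p.1) = p :: ps.filter (fun r => r.1 == p.1) :=
        List.filter_cons_of_pos (by simp)
      have htail : List.map (fun q => wrapS delimiter
            (List.map Prod.snd (List.filter (fun r => r.1 == q) (p :: ps)))) (rkeys p.1 ps) =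
          List.map (fun q => wrapS delimiter
            (List.map Prod.snd (List.filter (fun r => r.1 == q) ps))) (rkeys p.1 ps) := by
        apply List.map_congr_left
        intro q hq
        have hqp : p.1 < q := rkeys_gt ps p.1 hpw.2 hpw.1 q hq
        rw [List.filter_cons_of_neg (by simp; omega)]
      rw [List.map_cons, hhead, htail]
      simp [List.append_assoc]

-- stability of the sort -------------------------------------------------------

lemma filter_insertBy (x : Int × String) (k : Int) :
    ∀ (acc : List (Int × String)), acc.Pairwise (fun a b => a.1 ≤ b.1) →
    (PySem.List.insertBy (fun a b => decide (a.1 < b.1)) x acc).filter (fun p => p.1 == k) =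
      (if x.1 = k then acc.filter (fun p => p.1 == k) ++ [x] else acc.filter (fun p => p.1 == k)) := by
  intro acc
  induction acc with
  | nil =>
    intro _
    simp only [PySem.List.insertBy, List.filter_nil]
    by_cases hx : x.1 = k
    · rw [if_pos hx, List.filter_cons_of_pos (by simp [hx]), List.filter_nil]
      simp
    · rw [if_neg hx, List.filter_cons_of_neg (by simp [hx]), List.filter_nil]
  | cons y ys ih =>
    intro hpw
    rw [List.pairwise_cons] at hpw
    show (if (decide (x.1 < y.1)) = true then x :: y :: ys
          else y :: PySem.List.insertBy (fun a b => decide (a.1 < b.1)) x ys).filter (fun p => p.1 == k) = _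
    by_cases hlt : x.1 < y.1
    · rw [if_pos (by simpa using hlt)]
      by_cases hx : x.1 = k
      · have hys : (y :: ys).filter (fun p => p.1 == k) = [] := by
          rw [List.filter_eq_nil_iff]
          intro r hr
          simp only [List.mem_cons] at hr
          rcases hr with hr | hr
          · simp [hr]; omega
          · have := hpw.1 r hr; simp; omega
        rw [if_pos hx, List.filter_cons_of_pos (by simp [hx]), hys]
        simp
      · rw [if_neg hx, List.filter_cons_of_neg (by simp [hx])]
    · rw [if_neg (by simpa using hlt)]
      by_cases hy : y.1 = k
      · rw [List.filter_cons_of_pos (by simp [hy]), List.filter_cons_of_pos (by simp [hy]), ih hpw.2]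
        by_cases hx : x.1 = k
        · rw [if_pos hx, if_pos hx]; simp
        · rw [if_neg hx, if_neg hx]
      · rw [List.filter_cons_of_neg (by simp [hy]), List.filter_cons_of_neg (by simp [hy]), ih hpw.2]

lemma filter_sorted (ps : List (Int × String)) (k : Int) :
    (PySem.List.sorted ps (fun p => p.1) false).filter (fun p => p.1 == k) =
      ps.filter (fun p => p.1 == k) := by
  induction ps using List.reverseRecOn with
  | nil => simp [PySem.List.sorted_eq_foldl_insertBy]
  | append_singleton l x ih =>
    have h1 : PySem.List.sorted (l ++ [x]) (fun p => p.1) false =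
        PySem.List.insertBy (fun a b => decide (a.1 < b.1)) x (PySem.List.sorted l (fun p => p.1) false) := by
      rw [PySem.List.sorted_eq_foldl_insertBy, PySem.List.sorted_eq_foldl_insertBy, List.foldl_append]
      simp
    rw [h1, filter_insertBy x k _ (PySem.List.sorted_pairwise l (fun p => p.1) )]
    rw [ih, List.filter_append]
    by_cases hx : x.1 = k
    · rw [if_pos hx]
      congr 1
      rw [List.filter_cons_of_pos (by simp [hx]), List.filter_nil]
    · rw [if_neg hx]
      rw [List.filter_cons_of_neg (by simp [hx]), List.filter_nil, List.append_nil]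

-- assembly --------------------------------------------------------------------

lemma main_ps (delimiter : String) (ps : List (Int × String)) :
    (PySem.List.sorted (ps.foldl (aStep delimiter) PySem.Dict.empty).keys (fun k => k) false).map
        (fun k => (ps.foldl (aStep delimiter) PySem.Dict.empty).getD k "") =
      bFinish delimiter ((PySem.List.sorted ps (fun p => p.1) false).foldl (bStep delimiter) ([], none, [])) := by
  set sp := PySem.List.sorted ps (fun p => p.1) false with hsp
  have hperm : sp.Perm ps := PySem.List.sorted_perm ps (fun p => p.1) false
  have hpw : sp.Pairwise (fun a b => a.1 ≤ b.1) := PySem.List.sorted_pairwise ps (fun p => p.1)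
  have hfilter : ∀ k, sp.filter (fun p => p.1 == k) = ps.filter (fun p => p.1 == k) := by
    intro k; rw [hsp, filter_sorted]
  set d := ps.foldl (aStep delimiter) PySem.Dict.empty with hd
  have hget : ∀ k, d.get? k =
      (if (ps.filter (fun p => p.1 == k)).map Prod.snd = [] then none
       else some (wrapS delimiter ((ps.filter (fun p => p.1 == k)).map Prod.snd))) := by
    intro k
    have := aLoop_get? delimiter ps PySem.Dict.empty (fun _ => [])
      (by intro k; simp [PySem.Dict.get?_empty]) k
    simpa using this
  have hkeys : d.keys = PySem.Set.ofList (ps.map Prod.fst) := aLoop_keys delimiter ps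
  clear_value d
  have hmemps : ∀ k, k ∈ sp.map Prod.fst ↔ k ∈ ps.map Prod.fst := fun k => (hperm.map Prod.fst).mem_iff
  clear_value sp
  cases sp with
  | nil =>
    have hpsnil : ps = [] := by
      have h2 := hperm.symm
      exact List.perm_nil.mp h2
    rw [hpsnil] at hkeys
    simp only [List.map_nil] at hkeys
    have hofnil : PySem.Set.ofList ([] : List Int) = [] := by simp [PySem.Set.ofList]
    rw [hkeys, hofnil]
    have hnil : PySem.List.sorted ([] : List Int) (fun k => k) false = [] := by
      simp [PySem.List.sorted_eq_foldl_insertBy]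
    rw [hnil]
    simp [bFinish]
  | cons q rest =>
    rw [List.pairwise_cons] at hpw
    obtain ⟨hqle, hpw'⟩ := hpw
    have hKLpw : (q.1 :: rkeys q.1 rest).Pairwise (· < ·) := by
      rw [List.pairwise_cons]
      exact ⟨rkeys_gt rest q.1 hpw' hqle, rkeys_pairwise rest q.1 hpw' hqle⟩
    have hmemKL : ∀ k, k ∈ q.1 :: rkeys q.1 rest ↔ k ∈ ps.map Prod.fst := by
      intro k
      rw [← hmemps k, List.map_cons, List.mem_cons, List.mem_cons,
        mem_rkeys rest q.1 hpw' hqle k]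
      by_cases hk : k = q.1 <;> simp [hk]
    have hsorted : PySem.List.sorted d.keys (fun k => k) false = q.1 :: rkeys q.1 rest := by
      apply PySem.List.sorted_eq_of_perm_of_pairwise_lt
      · rw [hkeys]
        rw [List.perm_ext_iff_of_nodup (hKLpw.imp ne_of_lt) (PySem.Set.nodup_ofList _)]
        intro a
        rw [hmemKL a, PySem.Set.mem_ofList]
      · exact hKLpw
    rw [hsorted]
    rw [List.foldl_cons]
    have hstep0 : bStep delimiter ([], none, []) q = ([], some q.1, [q.2]) := by
      simp [bStep]
    rw [hstep0, foldl_bStep_eq_scanB delimiter rest [] q.1 [q.2] (by simp),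
      scanB_eq delimiter rest [] q.1 [q.2] hpw' hqle]
    have hheadps : (ps.filter (fun p => p.1 == q.1)).map Prod.snd =
        [q.2] ++ (rest.filter (fun p => p.1 == q.1)).map Prod.snd := by
      rw [← hfilter q.1, List.filter_cons_of_pos (by simp)]
      simp
    have htailps : ∀ k ∈ rkeys q.1 rest, (ps.filter (fun p => p.1 == k)).map Prod.snd =
        (rest.filter (fun p => p.1 == k)).map Prod.snd := by
      intro k hk
      have hkgt : q.1 < k := rkeys_gt rest q.1 hpw' hqle k hk
      rw [← hfilter k, List.filter_cons_of_neg (by simp; omega)]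
    have hA : (q.1 :: rkeys q.1 rest).map (fun k => d.getD k "") =
        (q.1 :: rkeys q.1 rest).map
          (fun k => wrapS delimiter ((ps.filter (fun p => p.1 == k)).map Prod.snd)) := by
      apply List.map_congr_left
      intro k hk
      have hkps : k ∈ ps.map Prod.fst := (hmemKL k).mp hk
      obtain ⟨r, hr, hrk⟩ := List.mem_map.mp hkps
      have hne : (ps.filter (fun p => p.1 == k)).map Prod.snd ≠ [] := by
        simp only [ne_eq, List.map_eq_nil_iff, List.filter_eq_nil_iff]
        intro h
        have h2 := h r hr
        simp [hrk] at h2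
      rw [PySem.Dict.getD_eq_get?_getD, hget k, if_neg hne]
      rfl
    rw [hA, List.map_cons, List.nil_append]
    congr 1
    · rw [hheadps]
    · apply List.map_congr_left
      intro k hk
      rw [htailps k hk]

-- ===== VERDICT (by name: the statement is the Claim_ definition above) =====
theorem combine_pred_target_texts_by_ids_py_spec : Claim_equal_combine_pred_target_texts_by_ids_py := by
  intro pred_target_texts split_ids delimiter _
  unfold Spec_combine_pred_target_texts_by_ids_py
  exact main_ps delimiter (List.zip split_ids pred_target_texts)
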